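-- pv_equiv track=rewrite | github.com/raeez/chiral-bar-cobar | compute/lib/w_orbit_duality.py | principal_hilbert_series_coeffs
-- ===== SOURCE A (Python) =====
-- from dataclasses import dataclass
-- from typing import Dict, Iterable, List, Optional, Tuple
--
-- @dataclass(frozen=True)
-- class SimpleLieAlgebraData:
--     """Core data for a simple Lie algebra."""
--
--     lie_type: str       # "A", "B", "C", "D", "E", "F", "G"
--     rank: int           # rank of g
--     dimension: int      # dim(g)
--     h_dual: int         # dual Coxeter number h^vee
--     exponents: Tuple[int, ...]  # Lie algebra exponents
--     is_simply_laced: bool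
--
-- def _sl_data(n: int) -> SimpleLieAlgebraData:
--     """Data for sl_n (type A_{n-1})."""
--     if n < 2:
--         raise ValueError("sl_n requires n >= 2")
--     return SimpleLieAlgebraData(
--         lie_type="A",
--         rank=n - 1,
--         dimension=n * n - 1,
--         h_dual=n,
--         exponents=tuple(range(1, n)),
--         is_simply_laced=True,
--     )
--
-- def principal_hilbert_series_coeffs(n: int, max_deg: int) -> List[int]:
--     """Hilbert series coefficients for the principal W_N OS algebra.
--
--     For the principal W-algebra, the OS algebra (= associated graded
--     of the bar complex) has generators in degrees d_1+1, ..., d_r+1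
--     where d_i are the exponents.  The Hilbert series is:
--
--     H(t) = prod_{i=1}^r 1/(1 - t^{d_i+1})
--
--     For W_2: H(t) = 1/(1-t^2)  [one generator, spin 2]
--     For W_3: H(t) = 1/((1-t^2)(1-t^3))  [generators at spin 2,3]
--     """
--     g = _sl_data(n)
--     # Compute coefficients of the product 1/prod(1-t^(e_i+1))
--     coeffs = [0] * (max_deg + 1)
--     coeffs[0] = 1
--     for e in g.exponents:
--         spin = e + 1
--         for d in range(spin, max_deg + 1):
--             coeffs[d] += coeffs[d - spin]
--     return coeffs
-- ===== SOURCE B (Python) =====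
-- def principal_hilbert_series_coeffs(n, max_deg):
--     if n < 2:
--         raise ValueError("sl_n requires n >= 2")
--     result = [0] * (max_deg + 1)
--     result[0] = 1
--     for spin in range(2, n + 1):
--         # convolve result with the series 1 + t^spin + t^(2*spin) + ... :
--         # one running accumulator per residue class mod spin, reading only the old array
--         new = [0] * (max_deg + 1)
--         for r in range(min(spin, max_deg + 1)):
--             acc = 0
--             for d in range(r, max_deg + 1, spin):
--                 acc += result[d]
--                 new[d] = acc
--         result = new
--     return result
-- ===== Notes on version B (the rewrite author's own statement) =====
-- stated objective: alternative
-- what changed: B multiplies the truncated generating-function factors explicitly, rebuilding the coefficient list by full convolution with each factor's 0/1 multiples-of-spin series, instead of A's in-place coin-change prefix update coeffs[d] += coeffs[d-spin].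
import Mathlib
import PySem

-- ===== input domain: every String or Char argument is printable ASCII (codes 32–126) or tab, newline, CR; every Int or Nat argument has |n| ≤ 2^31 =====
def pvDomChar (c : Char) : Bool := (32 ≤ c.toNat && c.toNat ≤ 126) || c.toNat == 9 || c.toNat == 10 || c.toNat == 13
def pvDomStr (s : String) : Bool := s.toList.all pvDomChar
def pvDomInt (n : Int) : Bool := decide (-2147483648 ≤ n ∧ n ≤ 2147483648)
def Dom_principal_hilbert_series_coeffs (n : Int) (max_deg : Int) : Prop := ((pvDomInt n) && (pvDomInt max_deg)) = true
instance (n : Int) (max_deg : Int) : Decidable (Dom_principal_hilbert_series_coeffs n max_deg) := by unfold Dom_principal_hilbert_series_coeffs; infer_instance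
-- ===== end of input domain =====

-- B replaces A's in-place coin-change update with an explicit convolution against each
-- factor's multiples-of-spin series, done residue class by residue class with a running
-- accumulator into a fresh array: an alternative decomposition of the same cost.

-- ===== PORT A =====
-- Literal port of A: coeffs = [0]*(max_deg+1); coeffs[0] = 1; for e in range(1, n):
-- spin = e+1; for d in range(spin, max_deg+1): coeffs[d] += coeffs[d-spin].
-- Indices d and d-spin are nonnegative on every admitted input (spin ≥ 2, d ≥ spin),
-- so .toNat is exact there; n < 2 (ValueError) and max_deg < 0 (IndexError) are excluded by Pre_.
def principal_hilbert_series_coeffs (n : Int) (max_deg : Int) : List Int :=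
  let coeffs := (List.replicate (max_deg + 1).toNat 0).set 0 1
  (PySem.List.pyRange 1 n 1).foldl (fun coeffs e =>
    let spin := e + 1
    (PySem.List.pyRange spin (max_deg + 1) 1).foldl (fun c d =>
      c.set d.toNat (c.getD d.toNat 0 + c.getD (d - spin).toNat 0)) coeffs) coeffs

-- ===== PORT B =====
-- Literal port of B: result = [0]*(max_deg+1); result[0] = 1; for spin in range(2, n+1):
-- new = [0]*(max_deg+1); for r in range(min(spin, max_deg+1)): acc = 0;
-- for d in range(r, max_deg+1, spin): acc += result[d]; new[d] = acc;  result = new.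
-- The loop indices r and d are nonnegative (r ≥ 0, d ≥ r, step spin > 0), so .toNat is
-- exact there; the inner accumulator loop is the fold over the (acc, new) pair.
def principal_hilbert_series_coeffs_alt (n : Int) (max_deg : Int) : List Int :=
  let init := (List.replicate (max_deg + 1).toNat 0).set 0 1
  (PySem.List.pyRange 2 (n + 1) 1).foldl (fun result spin =>
    let new0 := List.replicate (max_deg + 1).toNat (0 : Int)
    (PySem.List.pyRange 0 (min spin (max_deg + 1)) 1).foldl (fun new r =>
      ((PySem.List.pyRange r (max_deg + 1) spin).foldl
        (fun (p : Int × List Int) d =>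
          let acc := p.1 + result.getD d.toNat 0
          (acc, p.2.set d.toNat acc)) ((0 : Int), new)).2) new0) init

-- ===== PRECONDITION & SPEC =====
-- Pre_ excludes exactly the inputs where A raises: n < 2 (ValueError from _sl_data) and
-- max_deg < 0 (IndexError on coeffs[0] = 1 with an empty list). B raises identically there.
def Pre_principal_hilbert_series_coeffs (n : Int) (max_deg : Int) : Prop := 2 ≤ n ∧ 0 ≤ max_deg
instance (n : Int) (max_deg : Int) : Decidable (Pre_principal_hilbert_series_coeffs n max_deg) := by unfold Pre_principal_hilbert_series_coeffs; infer_instance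
def pvWitness_principal_hilbert_series_coeffs : Int × Int := (3, 6)

def Spec_principal_hilbert_series_coeffs (n : Int) (max_deg : Int) (out : List Int) : Prop := out = principal_hilbert_series_coeffs_alt n max_deg
instance (n : Int) (max_deg : Int) (out : List Int) : Decidable (Spec_principal_hilbert_series_coeffs n max_deg out) := by unfold Spec_principal_hilbert_series_coeffs; infer_instance

-- ===== CLAIM (what is proved, stated in full; the proofs are below) =====
def Claim_equal_principal_hilbert_series_coeffs : Prop := ∀ (n : Int) (max_deg : Int), Dom_principal_hilbert_series_coeffs n max_deg → Pre_principal_hilbert_series_coeffs n max_deg → Spec_principal_hilbert_series_coeffs n max_deg (principal_hilbert_series_coeffs n max_deg)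

-- ===== LEMMAS AND PROOFS =====

-- truncated convolution of c with the 0/1 indicator of multiples of s, at degree d
def pvConv (c : List Int) (s d : Nat) : Int :=
  ((List.range (d + 1)).map (fun k => c.getD k 0 * (if (d - k) % s = 0 then (1 : Int) else 0))).sum

theorem pvMap_getD_range (c : List Int) :
    (List.range c.length).map (fun i => c.getD i 0) = c := by
  apply List.ext_getElem
  · simp
  · intro i h1 h2
    simp [List.getD_eq_getElem?_getD, List.getElem?_eq_getElem h2]

theorem pvConv_lt (c : List Int) (s d : Nat) (h : d < s) :
    pvConv c s d = c.getD d 0 := by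
  unfold pvConv
  rw [List.range_succ, List.map_append, List.sum_append]
  have h1 : ((List.range d).map fun k => c.getD k 0 * if (d - k) % s = 0 then (1 : Int) else 0).sum = 0 := by
    apply List.sum_eq_zero
    intro x hx
    simp only [List.mem_map, List.mem_range] at hx
    obtain ⟨k, hk, rfl⟩ := hx
    rw [Nat.mod_eq_of_lt (by omega), if_neg (by omega), mul_zero]
  rw [h1]
  simp

theorem pvConv_rec (c : List Int) (s d : Nat) (hs : 0 < s) (h : s ≤ d) :
    pvConv c s d = c.getD d 0 + pvConv c s (d - s) := by
  unfold pvConv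
  have hsplit : d + 1 = (d - s + 1) + s := by omega
  rw [hsplit, List.range_add, List.map_append, List.sum_append]
  have h1 : ((List.range (d - s + 1)).map fun k => c.getD k 0 * if (d - k) % s = 0 then (1 : Int) else 0)
      = (List.range (d - s + 1)).map fun k => c.getD k 0 * if (d - s - k) % s = 0 then (1 : Int) else 0 := by
    apply List.map_congr_left
    intro k hk
    simp only [List.mem_range] at hk
    have he : d - k = (d - s - k) + s := by omega
    rw [he, Nat.add_mod_right]
  have hr : List.range s = List.range (s - 1) ++ [s - 1] := by
    conv_lhs => rw [show s = (s - 1) + 1 by omega]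
    rw [List.range_succ]
  have h2 : (((List.range s).map (fun j => d - s + 1 + j)).map fun k => c.getD k 0 * if (d - k) % s = 0 then (1 : Int) else 0).sum = c.getD d 0 := by
    rw [hr, List.map_append, List.map_append, List.sum_append]
    have hz : (((List.range (s - 1)).map (fun j => d - s + 1 + j)).map fun k => c.getD k 0 * if (d - k) % s = 0 then (1 : Int) else 0).sum = 0 := by
      apply List.sum_eq_zero
      intro x hx
      simp only [List.map_map, List.mem_map, List.mem_range, Function.comp] at hx
      obtain ⟨j, hj, rfl⟩ := hx
      have he : d - (d - s + 1 + j) = s - 1 - j := by omega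
      rw [he, Nat.mod_eq_of_lt (by omega), if_neg (by omega), mul_zero]
    rw [hz, zero_add]
    simp only [List.map_cons, List.map_nil, List.sum_cons, List.sum_nil]
    have he : d - s + 1 + (s - 1) = d := by omega
    rw [he, Nat.sub_self, Nat.zero_mod, if_pos rfl, mul_one, add_zero]
  rw [h1, h2]
  exact add_comm _ _

-- A's inner loop, characterized: after running d = spin .. spin+k-1, entry i holds the
-- convolution for i < spin+k and the old value above
theorem pvA_inner (c : List Int) (spin : Int) (h2 : 2 ≤ spin) (k : Nat) :
    spin + (k : Int) ≤ (c.length : Int) →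
    (PySem.List.pyRange spin (spin + (k : Int)) 1).foldl (fun c d =>
        c.set d.toNat (c.getD d.toNat 0 + c.getD (d - spin).toNat 0)) c
      = (List.range c.length).map (fun (i : Nat) =>
          if (i : Int) < spin + (k : Int) then pvConv c spin.toNat i else c.getD i 0) := by
  induction k with
  | zero =>
    intro hm
    rw [PySem.List.pyRange_one_eq_nil (by omega), List.foldl_nil]
    nth_rewrite 1 [← pvMap_getD_range c]
    apply List.map_congr_left
    intro i hi
    simp only [List.mem_range] at hi
    split_ifs with hlt
    · exact (pvConv_lt c _ i (by omega)).symm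
    · rfl
  | succ k ih =>
    intro hm
    have hcast : ((spin.toNat : Nat) : Int) = spin := Int.toNat_of_nonneg (by omega)
    have hstep : spin + ((k + 1 : Nat) : Int) = (spin + (k : Int)) + 1 := by push_cast; ring
    rw [hstep, PySem.List.pyRange_one_succ_right (by omega), List.foldl_append,
        ih (by omega), List.foldl_cons, List.foldl_nil]
    have htn : (spin + (k : Int)).toNat = spin.toNat + k := by omega
    have htn2 : ((spin + (k : Int)) - spin).toNat = k := by omega
    rw [htn, htn2,
        PySem.List.getD_map_range _ _ _ 0 (by omega),
        PySem.List.getD_map_range _ _ _ 0 (by omega),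
        if_neg (by omega), if_pos (by omega)]
    have hconv := pvConv_rec c spin.toNat (spin.toNat + k) (by omega) (by omega)
    rw [Nat.add_sub_cancel_left] at hconv
    rw [← hconv]
    apply List.ext_getElem
    · simp
    · intro i h1 h2'
      simp only [List.getElem_set, List.getElem_map, List.getElem_range]
      split_ifs with hs1 hs2 hs3 hs4 <;> try rfl
      · rw [hs1]
      · exfalso; omega
      · exfalso; omega
      · exfalso; omega

-- A's whole inner loop equals the convolution map, for any spin ≥ 2
theorem pvAstep_eq (max_deg : Int) (hmd : 0 ≤ max_deg) (spin : Int) (h2 : 2 ≤ spin)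
    (c : List Int) (hc : c.length = (max_deg + 1).toNat) :
    (PySem.List.pyRange spin (max_deg + 1) 1).foldl (fun c d =>
        c.set d.toNat (c.getD d.toNat 0 + c.getD (d - spin).toNat 0)) c
      = (List.range (max_deg + 1).toNat).map (fun (i : Nat) => pvConv c spin.toNat i) := by
  by_cases hle : spin ≤ max_deg + 1
  · have hk : max_deg + 1 = spin + (((max_deg + 1 - spin).toNat : Nat) : Int) := by omega
    conv_lhs => rw [hk]
    rw [pvA_inner c spin h2 (max_deg + 1 - spin).toNat (by rw [hc]; omega), hc]
    apply List.map_congr_left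
    intro i hi
    simp only [List.mem_range] at hi
    rw [if_pos (by omega)]
  · rw [PySem.List.pyRange_one_eq_nil (by omega), List.foldl_nil]
    nth_rewrite 1 [← pvMap_getD_range c]
    rw [hc]
    apply List.map_congr_left
    intro i hi
    simp only [List.mem_range] at hi
    exact (pvConv_lt c _ i (by omega)).symm

-- if i ≡ r (mod s) lies in the t-th stride window, it is the t-th stride point
theorem pvResEq {s r i t : Nat} (hs : 0 < s) (h1 : i % s = r) (h2 : r + s * t ≤ i)
    (h3 : i < r + s * (t + 1)) : i = r + s * t := by
  obtain ⟨q, hq⟩ : ∃ q, i = s * q + r := ⟨i / s, by conv_lhs => rw [← Nat.div_add_mod i s]; rw [h1]⟩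
  subst hq
  have h4 : s * t ≤ s * q := by linarith
  have h5 : s * q < s * (t + 1) := by linarith
  have h6 : t ≤ q := Nat.le_of_mul_le_mul_left h4 hs
  have h7 : q < t + 1 := Nat.lt_of_mul_lt_mul_left h5
  have hqt : q = t := by omega
  subst hqt
  exact Nat.add_comm _ _

-- one residue-class pass: a running accumulator down the stride r, r+s, ... writes the
-- convolution values at those positions and leaves everything else unchanged
theorem pvProg (c : List Int) (s r : Nat) (hs : 0 < s) (hr : r < s) (t : Nat) (new : List Int) :
    (List.range t).foldl (fun (p : Int × List Int) (k : Nat) =>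
        (p.1 + c.getD (r + s * k) 0, p.2.set (r + s * k) (p.1 + c.getD (r + s * k) 0))) ((0 : Int), new)
      = ((if t = 0 then 0 else pvConv c s (r + s * (t - 1))),
         (List.range new.length).map (fun (i : Nat) =>
           if i % s = r ∧ i < r + s * t then pvConv c s i else new.getD i 0)) := by
  induction t with
  | zero =>
    simp only [List.range_zero, List.foldl_nil, Nat.mul_zero, Nat.add_zero,
      Prod.mk.injEq]
    refine ⟨rfl, ?_⟩
    conv_lhs => rw [← pvMap_getD_range new]
    apply List.map_congr_left
    intro i hi
    rw [if_neg]
    rintro ⟨hc1, hc2⟩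
    have := Nat.mod_le i s
    omega
  | succ t ih =>
    rw [List.range_succ, List.foldl_append, ih]
    simp only [List.foldl_cons, List.foldl_nil, Prod.mk.injEq]
    have hexp : s * (t + 1) = s * t + s := by ring
    have hmod : (r + s * t) % s = r := by
      rw [Nat.add_mul_mod_self_left r s t, Nat.mod_eq_of_lt hr]
    have hacc : (if t = 0 then 0 else pvConv c s (r + s * (t - 1))) + c.getD (r + s * t) 0
        = pvConv c s (r + s * t) := by
      cases t with
      | zero =>
        simp [pvConv_lt c s r hr]
      | succ k =>
        rw [if_neg (Nat.succ_ne_zero k), Nat.add_sub_cancel]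
        have hone : s * 1 ≤ s * (k + 1) := Nat.mul_le_mul_left s (by omega)
        rw [Nat.mul_one] at hone
        have hle : s ≤ r + s * (k + 1) := by linarith
        have hsub : r + s * (k + 1) - s = r + s * k := by
          rw [show s * (k + 1) = s * k + s by ring, ← Nat.add_assoc, Nat.add_sub_cancel]
        rw [pvConv_rec c s (r + s * (k + 1)) hs hle, hsub]
        exact add_comm _ _
    refine ⟨?_, ?_⟩
    · rw [if_neg (Nat.succ_ne_zero t), Nat.add_sub_cancel]
      exact hacc
    · apply List.ext_getElem
      · simp
      · intro i hL hR
        simp only [List.getElem_set, List.getElem_map, List.getElem_range]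
        by_cases hset : r + s * t = i
        · rw [if_pos hset]
          have hcond : i % s = r ∧ i < r + s * (t + 1) := by
            refine ⟨?_, ?_⟩
            · rw [← hset]; exact hmod
            · rw [← hset, hexp]; linarith
          rw [if_pos hcond, hacc, hset]
        · rw [if_neg hset]
          by_cases hc1 : i % s = r ∧ i < r + s * t
          · rw [if_pos hc1, if_pos ⟨hc1.1, by rw [hexp]; linarith [hc1.2]⟩]
          · rw [if_neg hc1, if_neg (fun hcon =>
              hset (pvResEq hs hcon.1
                (by by_contra hlt; exact hc1 ⟨hcon.1, Nat.not_le.mp hlt⟩) hcon.2).symm)]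

-- index cast for the stride map produced by pyRange with a positive step
theorem pvCastIdx (r spin : Int) (hr : 0 ≤ r) (hs : 0 ≤ spin) (k : Nat) :
    (r + spin * (k : Int)).toNat = r.toNat + spin.toNat * k := by
  have h1 : spin * (k : Int) = ((spin.toNat * k : Nat) : Int) := by
    push_cast
    rw [Int.toNat_of_nonneg hs]
  rw [h1]
  generalize spin.toNat * k = N
  omega

-- the stride r, r+s, ... of length ⌈(m-r)/s⌉ covers every index < m in class r
theorem pvCeilBound (max_deg spin : Int) (u : Nat) (hu : (u : Int) < max_deg + 1)
    (hs : 2 ≤ spin) :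
    (max_deg + 1).toNat ≤ u + spin.toNat * ((max_deg + 1 - (u : Int) + spin - 1) / spin).toNat := by
  set m := (max_deg + 1).toNat with hm
  set s' := spin.toNat with hs'
  have hm1 : u + 1 ≤ m := by omega
  have hx : max_deg + 1 - (u : Int) + spin - 1 = ((m - u + s' - 1 : Nat) : Int) := by omega
  rw [hx]
  have hdiv : (((m - u + s' - 1 : Nat) : Int) / spin).toNat = (m - u + s' - 1) / s' := by
    rw [show spin = ((s' : Nat) : Int) by omega, ← Int.natCast_div, Int.toNat_natCast]
  rw [hdiv]
  set y := m - u + s' - 1 with hy0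
  obtain ⟨w, hw⟩ : ∃ w, m = u + 1 + w := ⟨m - u - 1, by omega⟩
  have hy : y = w + s' := by omega
  have hdm := Nat.div_add_mod y s'
  have hml : y % s' < s' := Nat.mod_lt _ (by omega)
  linarith [hdm, hml, hy, hw]

-- B's residue loop: after residues 0..u-1, every index in a processed class holds the
-- convolution value, the rest are still 0
theorem pvRes (c : List Int) (spin : Int) (h2 : 2 ≤ spin) (max_deg : Int) (hmd : 0 ≤ max_deg)
    (u : Nat) :
    ((u : Int) ≤ min spin (max_deg + 1)) →
    (PySem.List.pyRange 0 (u : Int) 1).foldl (fun new r =>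
        ((PySem.List.pyRange r (max_deg + 1) spin).foldl
          (fun (p : Int × List Int) d =>
            (p.1 + c.getD d.toNat 0, p.2.set d.toNat (p.1 + c.getD d.toNat 0)))
          ((0 : Int), new)).2)
      (List.replicate (max_deg + 1).toNat 0)
    = (List.range (max_deg + 1).toNat).map (fun (i : Nat) =>
        if i % spin.toNat < u then pvConv c spin.toNat i else 0) := by
  induction u with
  | zero =>
    intro _
    rw [Nat.cast_zero, PySem.List.pyRange_one_eq_nil le_rfl, List.foldl_nil]
    apply List.ext_getElem
    · simp
    · intro i h1 h2'
      simp
  | succ u ih =>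
    intro hu
    have hcast : ((u + 1 : Nat) : Int) = (u : Int) + 1 := by push_cast; ring
    rw [hcast, PySem.List.pyRange_one_succ_right (by exact_mod_cast Nat.zero_le u),
        List.foldl_append, ih (by omega)]
    simp only [List.foldl_cons, List.foldl_nil]
    have hT : (0 : Int) < spin := by omega
    rw [PySem.List.pyRange_of_pos (u : Int) (max_deg + 1) hT,
        if_pos (by omega : (u : Int) < max_deg + 1)]
    have hidx : ∀ k : Nat, ((u : Int) + spin * (k : Int)).toNat = u + spin.toNat * k := by
      intro k
      rw [pvCastIdx (u : Int) spin (Int.natCast_nonneg u) (by omega) k, Int.toNat_natCast]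
    simp only [List.foldl_map, hidx]
    rw [pvProg c spin.toNat u (by omega) (by omega)]
    dsimp only
    simp only [List.length_map, List.length_range]
    apply List.map_congr_left
    intro i hi
    simp only [List.mem_range] at hi
    rw [PySem.List.getD_map_range _ _ _ 0 hi]
    have hcover : (max_deg + 1).toNat ≤
        u + spin.toNat * ((max_deg + 1 - (u : Int) + spin - 1) / spin).toNat :=
      pvCeilBound max_deg spin u (by omega) h2
    by_cases h1 : i % spin.toNat = u
    · rw [if_pos ⟨h1, lt_of_lt_of_le hi hcover⟩, if_pos (by omega)]
    · rw [if_neg (fun hcon => h1 hcon.1)]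
      split_ifs <;> omega

-- B's step (residue-class accumulator passes) equals the same convolution map
theorem pvBstep_eq (max_deg : Int) (hmd : 0 ≤ max_deg) (spin : Int) (h2 : 2 ≤ spin)
    (c : List Int) :
    (PySem.List.pyRange 0 (min spin (max_deg + 1)) 1).foldl (fun new r =>
        ((PySem.List.pyRange r (max_deg + 1) spin).foldl
          (fun (p : Int × List Int) d =>
            (p.1 + c.getD d.toNat 0, p.2.set d.toNat (p.1 + c.getD d.toNat 0)))
          ((0 : Int), new)).2)
      (List.replicate (max_deg + 1).toNat 0)
    = (List.range (max_deg + 1).toNat).map (fun (i : Nat) => pvConv c spin.toNat i) := by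
  have hmin : min spin (max_deg + 1) = (((min spin (max_deg + 1)).toNat : Nat) : Int) := by omega
  rw [hmin, pvRes c spin h2 max_deg hmd (min spin (max_deg + 1)).toNat (by omega)]
  apply List.map_congr_left
  intro i hi
  simp only [List.mem_range] at hi
  have hm2 : (min spin (max_deg + 1)).toNat = min spin.toNat (max_deg + 1).toNat := by omega
  rw [if_pos (by
    rw [hm2]
    exact Nat.lt_min.mpr ⟨Nat.mod_lt i (by omega), lt_of_le_of_lt (Nat.mod_le i _) hi⟩)]

-- fold two step functions to the same result under an invariant preserved by the first
theorem pvFoldl_congr {α β : Type} (P : α → Prop) {f g : α → β → α} {l : List β} {a : α}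
    (hP : P a) (heq : ∀ x b, P x → b ∈ l → f x b = g x b)
    (hpres : ∀ x b, P x → b ∈ l → P (f x b)) : l.foldl f a = l.foldl g a := by
  induction l generalizing a with
  | nil => rfl
  | cons b t ih =>
    simp only [List.foldl_cons]
    rw [← heq a b hP (by simp)]
    exact ih (hpres a b hP (by simp))
      (fun x y hx hy => heq x y hx (List.mem_cons_of_mem _ hy))
      (fun x y hx hy => hpres x y hx (List.mem_cons_of_mem _ hy))

-- a fold whose step preserves length preserves length
theorem pvFoldl_len {β : Type} (l : List β) (f : List Int → β → List Int)
    (h : ∀ c d, (f c d).length = c.length) (a : List Int) :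
    (l.foldl f a).length = a.length := by
  induction l generalizing a with
  | nil => rfl
  | cons b t ih =>
    simp only [List.foldl_cons]
    rw [ih, h]

-- ===== VERDICT (by name: the statement is the Claim_ definition above) =====
theorem principal_hilbert_series_coeffs_spec : Claim_equal_principal_hilbert_series_coeffs := by
  intro n max_deg _ hpre
  obtain ⟨hn, hmd⟩ := hpre
  unfold Spec_principal_hilbert_series_coeffs principal_hilbert_series_coeffs principal_hilbert_series_coeffs_alt
  dsimp only []
  have hshift : PySem.List.pyRange 2 (n + 1) 1 = (PySem.List.pyRange 1 n 1).map (fun e => e + 1) := by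
    rw [PySem.List.pyRange_one, PySem.List.pyRange_one, List.map_map,
        show (n + 1 - 2).toNat = (n - 1).toNat by omega]
    apply List.map_congr_left
    intro k _
    simp only [Function.comp]
    ring
  rw [hshift, List.foldl_map]
  apply pvFoldl_congr (fun (a : List Int) => a.length = (max_deg + 1).toNat)
  · simp
  · intro a e ha he
    have h1e : (1 : Int) ≤ e := ((PySem.List.mem_pyRange_one).mp he).1
    exact (pvAstep_eq max_deg hmd (e + 1) (by omega) a ha).trans
      (pvBstep_eq max_deg hmd (e + 1) (by omega) a).symm
  · intro a e ha he
    exact (pvFoldl_len _ _ (fun c d => by simp) a).trans ha
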